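-- pv_equiv track=rewrite | github.com/linhdvu14/cp-sols | sols/CodeForces/1701_edu/B_Permutation.py | solve
-- ===== SOURCE A (Python) =====
-- def solve(N):
--     res = []
--     for i in range(1, N+1, 2):
--         j = i
--         while j <= N:
--             res.append(j)
--             j *= 2
--
--     return res
-- ===== SOURCE B (Python) =====
-- def solve(N):
--     def odd_part(k):
--         while k % 2 == 0:
--             k //= 2
--         return k
--     return sorted(range(1, N + 1), key=lambda k: (odd_part(k), k))
-- ===== Notes on version B (the rewrite author's own statement) =====
-- stated objective: alternative
-- what changed: Replaces A's nested loop (outer over odd starters, inner doubling chain) by a single stable sort of 1..N keyed by (odd part of k, k); the same grouping emerges from the sort order instead of being built chain by chain.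
import Mathlib
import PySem

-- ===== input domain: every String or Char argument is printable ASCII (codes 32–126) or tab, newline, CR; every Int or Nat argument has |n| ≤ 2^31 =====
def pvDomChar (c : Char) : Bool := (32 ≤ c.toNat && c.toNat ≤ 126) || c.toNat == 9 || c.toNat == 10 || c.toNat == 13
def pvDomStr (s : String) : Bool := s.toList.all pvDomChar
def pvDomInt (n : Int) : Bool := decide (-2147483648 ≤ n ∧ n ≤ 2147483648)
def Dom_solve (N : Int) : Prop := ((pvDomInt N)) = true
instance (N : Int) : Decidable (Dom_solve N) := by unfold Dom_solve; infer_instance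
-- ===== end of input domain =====

-- B replaces A's odd-starter/doubling double loop by one stable sort of 1..N keyed by (odd part, k); alternative decomposition, not faster.

-- ===== PORT A =====
-- inner 'while j <= N: res.append(j); j *= 2' — fuel only makes the loop total
-- (with j ≥ 1, as every call from solve has, N.toNat+1 doublings always exceed N)
def chainA (fuel : Nat) (N j : Int) : List Int :=
  match fuel with
  | 0 => []
  | f + 1 => if j ≤ N then j :: chainA f N (j * 2) else []

def solve (N : Int) : List Int :=
  (PySem.List.pyRange 1 (N + 1) 2).foldl (fun res i => res ++ chainA (N.toNat + 1) N i) []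

-- ===== PORT B =====
-- 'while k % 2 == 0: k //= 2' — fuel k.toNat only makes the loop total (suffices for k ≥ 1)
def oddPartF (fuel : Nat) (k : Int) : Int :=
  match fuel with
  | 0 => k
  | f + 1 => if PySem.Int.mod k 2 == 0 then oddPartF f (PySem.Int.floordiv k 2) else k

def oddPart (k : Int) : Int := oddPartF k.toNat k

def solve_alt (N : Int) : List Int :=
  PySem.List.sorted2 (PySem.List.pyRange 1 (N + 1) 1) oddPart (fun k => k) false

-- ===== PRECONDITION & SPEC =====
def Spec_solve (N : Int) (out : List Int) : Prop := out = solve_alt N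
instance (N : Int) (out : List Int) : Decidable (Spec_solve N out) := by unfold Spec_solve; infer_instance

-- ===== CLAIM (what is proved, stated in full; the proofs are below) =====
def Claim_equal_solve : Prop := ∀ (N : Int), Dom_solve N → Spec_solve N (solve N)

-- ===== LEMMAS AND PROOFS =====

-- the lexicographic key of B's sort
def pvKey (k : Int) : Lex (Int × Int) := toLex (oddPart k, k)

theorem oddPartF_of_odd (f : Nat) (k : Int) (h : k % 2 = 1) : oddPartF f k = k := by
  cases f with
  | zero => rfl
  | succ f =>
      unfold oddPartF
      rw [PySem.Int.mod_eq_emod_of_pos (by norm_num), h]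
      simp

theorem oddPartF_mul_pow (f e : Nat) (i : Int) (_hi1 : 1 ≤ i) (hodd : i % 2 = 1)
    (hf : e ≤ f) : oddPartF f (i * 2 ^ e) = i := by
  induction e generalizing f with
  | zero =>
      simpa using oddPartF_of_odd f i hodd
  | succ e ih =>
      obtain ⟨f', rfl⟩ : ∃ f', f = f' + 1 := ⟨f - 1, by omega⟩
      unfold oddPartF
      have hmod : PySem.Int.mod (i * 2 ^ (e + 1)) 2 = 0 := by
        rw [PySem.Int.mod_eq_emod_of_pos (by norm_num)]
        have : (2:Int) ∣ i * 2 ^ (e + 1) := ⟨i * 2 ^ e, by ring⟩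
        omega
      have hdiv : PySem.Int.floordiv (i * 2 ^ (e + 1)) 2 = i * 2 ^ e := by
        rw [PySem.Int.floordiv_eq_ediv_of_pos (by norm_num)]
        have : i * 2 ^ (e + 1) = (i * 2 ^ e) * 2 := by ring
        rw [this, Int.mul_ediv_cancel _ (by norm_num)]
      rw [hmod]
      simp only [hdiv]
      simp only [beq_self_eq_true, if_true]
      exact ih f' (by omega)

theorem oddPart_mul_pow (e : Nat) (i : Int) (hi1 : 1 ≤ i) (hodd : i % 2 = 1) :
    oddPart (i * 2 ^ e) = i := by
  apply oddPartF_mul_pow _ _ _ hi1 hodd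
  have h1 : (e : Int) < 2 ^ e := by exact_mod_cast Nat.lt_two_pow_self
  have h2 : (i * 2 ^ e : Int) = ((i * 2 ^ e).toNat : Int) := by
    have : (0:Int) ≤ i * 2 ^ e := by positivity
    omega
  have : (e : Int) ≤ ((i * 2 ^ e).toNat : Int) := by
    nlinarith [pow_pos (by norm_num : (0:Int) < 2) e]
  exact_mod_cast this

-- every element of a chain is j·2^e and ≤ N
theorem chainA_mem_shape (f : Nat) (N j m : Int) (hm : m ∈ chainA f N j) :
    (∃ e : Nat, m = j * 2 ^ e) ∧ m ≤ N := by
  induction f generalizing j with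
  | zero => simp [chainA] at hm
  | succ f ih =>
      unfold chainA at hm
      split at hm
      · rcases List.mem_cons.1 hm with rfl | hm'
        · exact ⟨⟨0, by ring⟩, by assumption⟩
        · obtain ⟨⟨e, rfl⟩, hle⟩ := ih _ hm'
          exact ⟨⟨e + 1, by ring⟩, hle⟩
      · simp at hm

theorem mem_chainA (f : Nat) (N j : Int) (e : Nat) (hj : 1 ≤ j)
    (hle : j * 2 ^ e ≤ N) (hbig : N < j * 2 ^ f) : j * 2 ^ e ∈ chainA f N j := by
  induction e generalizing j f with
  | zero =>
      have hjN : j ≤ N := by simpa using hle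
      obtain ⟨f', rfl⟩ : ∃ f', f = f' + 1 := by
        rcases f with _ | f'
        · exfalso; simp at hbig; omega
        · exact ⟨f', rfl⟩
      unfold chainA
      rw [if_pos hjN]
      simp
  | succ e ih =>
      have hjN : j ≤ N := by
        have : j ≤ j * 2 ^ (e + 1) := le_mul_of_one_le_right (by omega) (one_le_pow₀ (by norm_num))
        omega
      obtain ⟨f', rfl⟩ : ∃ f', f = f' + 1 := by
        rcases f with _ | f'
        · exfalso; simp at hbig; omega
        · exact ⟨f', rfl⟩
      unfold chainA
      rw [if_pos hjN]
      refine List.mem_cons_of_mem _ ?_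
      have h1 : (j * 2) * 2 ^ e = j * 2 ^ (e + 1) := by ring
      have h2 : (j * 2) * 2 ^ f' = j * 2 ^ (f' + 1) := by ring
      have := ih f' (j * 2) (by omega) (by rw [h1]; exact hle) (by rw [h2]; exact hbig)
      rwa [h1] at this

theorem chainA_pairwise (f : Nat) (N j : Int) (hj : 1 ≤ j) :
    (chainA f N j).Pairwise (· < ·) := by
  induction f generalizing j with
  | zero => simp [chainA]
  | succ f ih =>
      unfold chainA
      split
      · refine List.Pairwise.cons ?_ (ih _ (by omega))
        intro m hm
        obtain ⟨⟨e, rfl⟩, _⟩ := chainA_mem_shape _ _ _ _ hm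
        have : (1:Int) ≤ 2 ^ e := one_le_pow₀ (by norm_num)
        nlinarith
      · exact List.Pairwise.nil

theorem two_pow_gt (N : Int) : N < 2 ^ (N.toNat + 1) := by
  have h : (N.toNat : Int) < 2 ^ (N.toNat + 1) := by
    exact_mod_cast Nat.lt_two_pow_self.trans (Nat.pow_lt_pow_succ (by norm_num))
  omega

-- members of the odd-starter range
theorem mem_range2 (N i : Int) (hi' : i ∈ PySem.List.pyRange 1 (N + 1) 2) :
    1 ≤ i ∧ i ≤ N ∧ i % 2 = 1 := by
  rw [PySem.List.mem_pyRange_iff_of_pos (by norm_num)] at hi'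
  obtain ⟨h1, h2, k, hk⟩ := hi'
  refine ⟨h1, by omega, by omega⟩

-- solve N as a flatMap
theorem solve_eq_flatMap (N : Int) :
    solve N = (PySem.List.pyRange 1 (N + 1) 2).flatMap (fun i => chainA (N.toNat + 1) N i) := by
  unfold solve
  rw [PySem.List.foldl_append_eq_flatMap]
  simp

theorem mem_solve_iff (N m : Int) : m ∈ solve N ↔ 1 ≤ m ∧ m ≤ N := by
  rw [solve_eq_flatMap, List.mem_flatMap]
  constructor
  · rintro ⟨i, hi, hm⟩
    obtain ⟨h1, h2, _⟩ := mem_range2 _ _ hi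
    obtain ⟨⟨e, rfl⟩, hle⟩ := chainA_mem_shape _ _ _ _ hm
    have : (1:Int) ≤ 2 ^ e := one_le_pow₀ (by norm_num)
    exact ⟨by nlinarith, hle⟩
  · rintro ⟨h1, h2⟩
    -- decompose m = i * 2^e with i odd
    obtain ⟨e, i, hodd, rfl⟩ : ∃ (e : Nat) (i : Int), i % 2 = 1 ∧ m = i * 2 ^ e := by
      obtain ⟨k, hk1, rfl⟩ : ∃ k : Nat, 0 < k ∧ m = (k : Int) := ⟨m.toNat, by omega, by omega⟩
      obtain ⟨e, i, hodd, hik⟩ := Nat.exists_eq_pow_mul_and_not_dvd (n := k) (by omega) 2 (by norm_num)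
      refine ⟨e, (i : Int), ?_, ?_⟩
      · omega
      · push_cast [hik]; ring
    have hi1 : 1 ≤ i := by
      by_contra h
      have : (1:Int) ≤ 2 ^ e := one_le_pow₀ (by norm_num)
      nlinarith
    refine ⟨i, ?_, mem_chainA _ _ _ _ hi1 h2 ?_⟩
    · rw [PySem.List.mem_pyRange_iff_of_pos (by norm_num)]
      have : (1:Int) ≤ 2 ^ e := one_le_pow₀ (by norm_num)
      refine ⟨hi1, by nlinarith, ?_⟩
      omega
    · have := two_pow_gt N
      nlinarith

theorem solve_pairwise_key (N : Int) :
    (solve N).Pairwise (fun a b => pvKey a < pvKey b) := by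
  rw [solve_eq_flatMap, List.pairwise_flatMap]
  constructor
  · intro i hi
    obtain ⟨h1, _, hodd⟩ := mem_range2 _ _ hi
    have hshape := chainA_mem_shape (N.toNat + 1) N i
    refine (chainA_pairwise _ _ _ h1).imp_of_mem ?_
    intro a b ha hb hab
    obtain ⟨⟨e, rfl⟩, _⟩ := hshape _ ha
    obtain ⟨⟨e', rfl⟩, _⟩ := hshape _ hb
    rw [pvKey, pvKey, Prod.Lex.lt_iff]
    right
    refine ⟨?_, by simpa using hab⟩
    have he := oddPart_mul_pow e i h1 hodd
    have he' := oddPart_mul_pow e' i h1 hodd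
    simp [he, he']
  · have hpw : (PySem.List.pyRange 1 (N + 1) 2).Pairwise (· < ·) := by
      rw [PySem.List.pyRange_of_pos 1 (N + 1) (by norm_num)]
      refine List.Pairwise.map _ ?_ (List.pairwise_lt_range)
      intro a b hab
      omega
    refine hpw.imp_of_mem ?_
    intro i i' hi hi' hlt x hx y hy
    obtain ⟨h1, _, hodd⟩ := mem_range2 _ _ hi
    obtain ⟨h1', _, hodd'⟩ := mem_range2 _ _ hi'
    obtain ⟨⟨e, rfl⟩, _⟩ := chainA_mem_shape _ _ _ _ hx
    obtain ⟨⟨e', rfl⟩, _⟩ := chainA_mem_shape _ _ _ _ hy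
    rw [pvKey, pvKey, Prod.Lex.lt_iff]
    left
    simpa [oddPart_mul_pow _ _ h1 hodd, oddPart_mul_pow _ _ h1' hodd'] using hlt

theorem solve_nodup (N : Int) : (solve N).Nodup := by
  refine (solve_pairwise_key N).imp ?_
  intro a b hab h
  subst h
  exact lt_irrefl _ hab

theorem solve_perm (N : Int) : (solve N).Perm (PySem.List.pyRange 1 (N + 1) 1) := by
  rw [List.perm_ext_iff_of_nodup (solve_nodup N) (PySem.List.nodup_pyRange_one _ _)]
  intro a
  rw [mem_solve_iff, PySem.List.mem_pyRange_one]
  omega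

-- B's sorted2 with the pair key equals sorted with the lexicographic key
theorem sorted2_eq_sorted_lex (xs : List Int) :
    PySem.List.sorted2 xs oddPart (fun k => k) false =
      PySem.List.sorted xs pvKey false := by
  rw [PySem.List.sorted_eq_foldl_insertBy]
  have hbefore : (fun a b : Int => decide (oddPart a < oddPart b) || (!decide (oddPart b < oddPart a) && decide (a < b)))
      = (fun a b : Int => decide (pvKey a < pvKey b)) := by
    funext a b
    have h : (decide (oddPart a < oddPart b) || (!decide (oddPart b < oddPart a) && decide (a < b)))
        = decide ((oddPart a < oddPart b) ∨ (oddPart a ≤ oddPart b ∧ a < b)) := by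
      simp [← decide_not, not_lt]
    rw [h, decide_eq_decide]
    simp only [pvKey, Prod.Lex.lt_iff]
    simp only [ofLex_toLex]
    omega
  show xs.foldl (fun acc x => PySem.List.insertBy (fun a b : Int => decide (oddPart a < oddPart b) || (!decide (oddPart b < oddPart a) && decide (a < b))) x acc) [] = _
  rw [hbefore]

-- ===== VERDICT (by name: the statement is the Claim_ definition above) =====
theorem solve_spec : Claim_equal_solve := by
  intro N _
  unfold Spec_solve solve_alt
  rw [sorted2_eq_sorted_lex]
  exact (PySem.List.sorted_eq_of_perm_of_pairwise_lt _ _ _ (solve_perm N) (solve_pairwise_key N)).symm
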